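-- pv_equiv track=rewrite | github.com/orbisvicis/protostrings | protostrings_metadata.py | splitlinesat
-- ===== SOURCE A (Python) =====
-- def splitlinesat(string, separator):
--     split = []
--     group = []
--     for line in string.splitlines():
--         if separator in line:
--             split.append("\n".join(group))
--             group = []
--         else:
--             group.append(line)
--     if group:
--         split.append("\n".join(group))
--     return split
-- ===== SOURCE B (Python) =====
-- def splitlinesat(string, separator):
--     lines = string.splitlines()
--     indices = [i for i, l in enumerate(lines) if separator in l]
--     split = []
--     prev = 0
--     for idx in indices:
--         split.append("\n".join(lines[prev:idx]))
--         prev = idx + 1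
--     tail = lines[prev:]
--     if tail:
--         split.append("\n".join(tail))
--     return split
-- ===== Notes on version B (the rewrite author's own statement) =====
-- stated objective: alternative
-- what changed: B first builds a table of separator-line indices via enumerate, then produces the groups by slicing between consecutive separator positions, instead of A's single pass that maintains a growing group accumulator.
import Mathlib
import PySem

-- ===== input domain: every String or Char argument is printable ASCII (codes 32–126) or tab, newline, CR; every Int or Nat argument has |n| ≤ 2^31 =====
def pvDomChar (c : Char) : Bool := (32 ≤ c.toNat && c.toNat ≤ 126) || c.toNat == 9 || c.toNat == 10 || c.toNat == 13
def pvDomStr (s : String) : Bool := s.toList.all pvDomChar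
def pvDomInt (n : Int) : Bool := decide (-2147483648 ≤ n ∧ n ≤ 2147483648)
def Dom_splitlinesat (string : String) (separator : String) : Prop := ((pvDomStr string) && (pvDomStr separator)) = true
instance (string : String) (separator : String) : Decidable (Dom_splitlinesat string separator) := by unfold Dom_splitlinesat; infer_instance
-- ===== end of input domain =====

-- B replaces A's one-pass group accumulator by an index table of separator lines followed by slicing; alternative decomposition, same cost.


-- ===== PORT A =====
def splitlinesat (string : String) (separator : String) : List String :=
  let r := (PySem.Str.splitlines string).foldl
    (fun (st : List String × List String) line =>
      if PySem.Str.isIn separator line then (st.1 ++ [PySem.Str.join "\n" st.2], [])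
      else (st.1, st.2 ++ [line]))
    ([], [])
  if r.2 ≠ [] then r.1 ++ [PySem.Str.join "\n" r.2] else r.1

-- ===== PORT B =====
def splitlinesat_alt (string : String) (separator : String) : List String :=
  let lines := PySem.Str.splitlines string
  let indices := ((PySem.List.enumerate lines 0).filter
      (fun p => PySem.Str.isIn separator p.2)).map Prod.fst
  let r := indices.foldl
    (fun (st : List String × Int) idx =>
      (st.1 ++ [PySem.Str.join "\n" (PySem.List.slice lines (some st.2) (some idx))], idx + 1))
    ([], 0)
  let tail := PySem.List.slice lines (some r.2) none
  if tail ≠ [] then r.1 ++ [PySem.Str.join "\n" tail] else r.1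

-- ===== PRECONDITION & SPEC =====
def Spec_splitlinesat (string : String) (separator : String) (out : List String) : Prop := out = splitlinesat_alt string separator
instance (string : String) (separator : String) (out : List String) : Decidable (Spec_splitlinesat string separator out) := by unfold Spec_splitlinesat; infer_instance

-- ===== CLAIM (what is proved, stated in full; the proofs are below) =====
def Claim_equal_splitlinesat : Prop := ∀ (string : String) (separator : String), Dom_splitlinesat string separator → Spec_splitlinesat string separator (splitlinesat string separator)

-- ===== LEMMAS AND PROOFS =====

-- Reference recursion: split the lines `ls` at separator lines, with pending group `g`.
def goSplit (sep : String) : List String → List String → List String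
  | [], g => if g = [] then [] else [PySem.Str.join "\n" g]
  | l :: ls, g =>
      if PySem.Str.isIn sep l then PySem.Str.join "\n" g :: goSplit sep ls []
      else goSplit sep ls (g ++ [l])

-- Relative positions (in ls) of the lines containing sep.
def sepIdxs (sep : String) : List String → List Nat
  | [] => []
  | l :: ls =>
      if PySem.Str.isIn sep l then 0 :: (sepIdxs sep ls).map (· + 1)
      else (sepIdxs sep ls).map (· + 1)

-- A's loop+finish computes goSplit.
lemma A_eq_go (sep : String) (ls : List String) : ∀ (s g : List String),
    (let r := ls.foldl
        (fun (st : List String × List String) line =>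
          if PySem.Str.isIn sep line then (st.1 ++ [PySem.Str.join "\n" st.2], [])
          else (st.1, st.2 ++ [line])) (s, g)
     if r.2 ≠ [] then r.1 ++ [PySem.Str.join "\n" r.2] else r.1) = s ++ goSplit sep ls g := by
  induction ls with
  | nil =>
      intro s g
      simp only [List.foldl_nil, goSplit]
      by_cases h : g = [] <;> simp [h]
  | cons l ls ih =>
      intro s g
      simp only [List.foldl_cons, goSplit]
      by_cases h : PySem.Str.isIn sep l
      · simp only [h, if_pos]
        rw [ih (s ++ [PySem.Str.join "\n" g]) []]
        simp
      · simp only [h, if_neg, Bool.false_eq_true, not_false_iff]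
        rw [ih s (g ++ [l])]

-- The comprehension over enumerate yields the separator positions (shifted by the start).
lemma enum_idxs (sep : String) (ls : List String) : ∀ (k : Nat),
    ((PySem.List.enumerate ls (k : Int)).filter
        (fun p => PySem.Str.isIn sep p.2)).map Prod.fst
      = (sepIdxs sep ls).map (fun n => ((n + k : Nat) : Int)) := by
  induction ls with
  | nil => intro k; simp [PySem.List.enumerate_nil, sepIdxs]
  | cons l ls ih =>
      intro k
      rw [PySem.List.enumerate_cons]
      have hk : ((k : Int) + 1) = ((k + 1 : Nat) : Int) := by push_cast; ring
      by_cases h : PySem.Str.isIn sep l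
      · simp only [sepIdxs, h, if_pos, List.filter_cons, List.map_cons]
        rw [hk, ih (k + 1)]
        simp only [List.map_map]
        congr 1
        · simp
        · apply List.map_congr_left; intro n _; simp only [Function.comp_apply]; push_cast; ring
      · simp only [sepIdxs, h, if_neg, List.filter_cons, Bool.false_eq_true, not_false_iff]
        rw [hk, ih (k + 1)]
        simp only [List.map_map]
        apply List.map_congr_left; intro n _; simp only [Function.comp_apply]; push_cast; ring

-- B's loop over the (absolute) separator positions of the suffix ls, with the current
-- group P (separator-free) starting at position pre.length, computes goSplit.
lemma B_eq_go (sep : String) : ∀ (ls pre P s : List String),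
    (∀ x ∈ P, PySem.Str.isIn sep x = false) →
    (let F := pre ++ P ++ ls
     let r := ((sepIdxs sep ls).map (fun n => ((n + (pre.length + P.length) : Nat) : Int))).foldl
        (fun (st : List String × Int) idx =>
          (st.1 ++ [PySem.Str.join "\n" (PySem.List.slice F (some st.2) (some idx))], idx + 1))
        (s, (pre.length : Int))
     let tail := PySem.List.slice F (some r.2) none
     if tail ≠ [] then r.1 ++ [PySem.Str.join "\n" tail] else r.1) = s ++ goSplit sep ls P := by
  intro ls
  induction ls with
  | nil =>
      intro pre P s _
      simp only [sepIdxs, List.map_nil, List.foldl_nil, goSplit]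
      have htail : PySem.List.slice (pre ++ P ++ []) (some ((pre.length : Nat) : Int)) none = P := by
        rw [PySem.List.slice_from_natCast]
        simp
      simp only [htail]
      by_cases h : P = [] <;> simp [h]
  | cons l ls ih =>
      intro pre P s hP
      by_cases h : PySem.Str.isIn sep l
      · simp only [sepIdxs, h, if_pos, List.map_cons, List.foldl_cons, goSplit]
        have hslice : PySem.List.slice (pre ++ P ++ l :: ls)
            (some ((pre.length : Nat) : Int)) (some (((0 + (pre.length + P.length) : Nat) : Int))) = P := by
          rw [Nat.zero_add, PySem.List.slice_natCast, List.append_assoc, List.drop_left,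
            Nat.add_sub_cancel_left]
          exact List.take_left
        rw [hslice]
        have hmap : ((sepIdxs sep ls).map (· + 1)).map
              (fun n => ((n + (pre.length + P.length) : Nat) : Int))
            = (sepIdxs sep ls).map
              (fun n => ((n + ((pre ++ P ++ [l]).length + ([] : List String).length) : Nat) : Int)) := by
          simp only [List.map_map]
          apply List.map_congr_left; intro n _; simp; ring
        have hprev : (((0 + (pre.length + P.length) : Nat) : Int) + 1)
            = (((pre ++ P ++ [l]).length : Nat) : Int) := by
          simp; ring
        rw [hmap, hprev]
        have hF : pre ++ P ++ l :: ls = (pre ++ P ++ [l]) ++ ([] : List String) ++ ls := by simp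
        rw [hF]
        rw [ih (pre ++ P ++ [l]) [] (s ++ [PySem.Str.join "\n" P]) (by intro x hx; simp at hx)]
        simp
      · simp only [sepIdxs, h, Bool.false_eq_true, if_neg, not_false_iff, goSplit]
        have hmap : ((sepIdxs sep ls).map (· + 1)).map
              (fun n => ((n + (pre.length + P.length) : Nat) : Int))
            = (sepIdxs sep ls).map
              (fun n => ((n + (pre.length + (P ++ [l]).length) : Nat) : Int)) := by
          simp only [List.map_map]
          apply List.map_congr_left; intro n _; simp; ring
        rw [hmap]
        have hF : pre ++ P ++ l :: ls = pre ++ (P ++ [l]) ++ ls := by simp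
        rw [hF]
        rw [ih pre (P ++ [l]) s (by
          intro x hx
          rcases List.mem_append.mp hx with hx | hx
          · exact hP x hx
          · simp at hx; subst hx; simpa using h)]

-- ===== VERDICT (by name: the statement is the Claim_ definition above) =====
theorem splitlinesat_spec : Claim_equal_splitlinesat := by
  intro string separator _
  show splitlinesat string separator = splitlinesat_alt string separator
  have hA := A_eq_go separator (PySem.Str.splitlines string) [] []
  have hidx := enum_idxs separator (PySem.Str.splitlines string) 0
  have hB := B_eq_go separator (PySem.Str.splitlines string) [] [] [] (by intro x hx; simp at hx)
  simp only [List.append_nil, List.nil_append, List.length_nil, Nat.add_zero,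
    Nat.cast_zero] at hA hidx hB
  simp only [splitlinesat, splitlinesat_alt]
  rw [hA, hidx, ← hB]
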